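-- pv_equiv track=rewrite | github.com/MIMPython/MIMPython2023-Assignment | assignment_module04/module04_student04_TranNgocHieu/module04_assignment08_student04_TranNgocHieu.py | getRightMostDigit
-- ===== SOURCE A (Python) =====
-- def getRightMostDigit(n):
--     if n == 0: return 1
--     if n == 1: return 1
--     if n == 2: return 2
--     if n == 3: return 6
--     if n == 4: return 4
--     else:
--         m = int(n / 5)
--         if m % 2 == 0:
--             digit = 6
--         else:
--             digit = 4
--         for i in range(m * 5 + 1, n + 1):
--             digit = (digit * (i % 10)) % 10
--         remainder = [2, 4, 8, 6]
--         index = remainder.index(digit)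
--         digit = remainder[(index - (m % 4) % 4)]
--         return (digit * getRightMostDigit(m)) % 10
-- ===== SOURCE B (Python) =====
-- def getRightMostDigit(n):
--     base = {0: 1, 1: 1, 2: 2, 3: 6, 4: 4}
--     result = 1
--     while n >= 5:
--         m = n // 5
--         digit = 6 if m % 2 == 0 else 4
--         for i in range(m * 5 + 1, n + 1):
--             digit = (digit * (i % 10)) % 10
--         remainder = [2, 4, 8, 6]
--         digit = remainder[(remainder.index(digit) - m % 4) % 4]
--         result = (result * digit) % 10
--         n = m
--     return (result * base[n]) % 10
-- ===== Notes on version B (the rewrite author's own statement) =====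
-- stated objective: simpler
-- what changed: Flattens A's linear recursion on n -> n//5 into an iterative while-loop with a running product mod 10, replaces the negative-index wraparound remainder[index - m%4] by an explicit (index - m%4) % 4, and ends with a single dict lookup for the base value.
-- outside the precondition, e.g. on getRightMostDigit(-1): A returns 6, B raises KeyError
import Mathlib
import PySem

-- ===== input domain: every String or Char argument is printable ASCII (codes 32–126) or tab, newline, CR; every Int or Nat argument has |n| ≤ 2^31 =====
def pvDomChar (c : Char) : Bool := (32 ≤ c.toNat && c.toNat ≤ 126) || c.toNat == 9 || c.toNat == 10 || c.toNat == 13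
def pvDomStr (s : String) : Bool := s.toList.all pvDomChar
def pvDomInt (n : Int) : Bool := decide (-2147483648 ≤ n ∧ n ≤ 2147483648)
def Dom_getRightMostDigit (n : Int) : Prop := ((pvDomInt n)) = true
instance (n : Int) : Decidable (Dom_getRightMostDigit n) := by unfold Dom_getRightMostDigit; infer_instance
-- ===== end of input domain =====

-- B flattens A's recursion into an iterative loop with a running product mod 10 (objective: simpler).

-- ===== PORT A =====
-- A's self-recursion, made total with a fuel argument (fuel := n.natAbs + 1 always suffices,
-- since |int(n/5)| < |n| on every branch that recurses).
def pvGA : Nat → Int → Int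
  | 0, _ => 0  -- unreachable with sufficient fuel
  | fuel+1, n =>
    if n = 0 then 1
    else if n = 1 then 1
    else if n = 2 then 2
    else if n = 3 then 6
    else if n = 4 then 4
    else
      -- int(n / 5): truncating division; exact (float division is exact enough for |n| ≤ 2^31)
      let m := n.tdiv 5
      let digit : Int := if PySem.Int.mod m 2 = 0 then 6 else 4
      let digit := (PySem.List.pyRange (m * 5 + 1) (n + 1) 1).foldl
        (fun d i => PySem.Int.mod (d * PySem.Int.mod i 10) 10) digit
      let remainder : List Int := [2, 4, 8, 6]
      -- digit is always an element of remainder here, so index? is some; getD 0 is unreachable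
      let index : Int := ((PySem.List.index? remainder digit).getD 0 : Nat)
      -- remainder[index - (m % 4) % 4]: Python negative-index wraparound; the index is in [-3, 3]
      let digit := (PySem.List.pyGet? remainder (index - PySem.Int.mod (PySem.Int.mod m 4) 4)).getD 0
      PySem.Int.mod (digit * pvGA fuel m) 10

def getRightMostDigit (n : Int) : Int := pvGA (n.natAbs + 1) n

-- ===== PORT B =====
def pvBase : PySem.Dict Int Int :=
  (((((PySem.Dict.empty.insert 0 1).insert 1 1).insert 2 2).insert 3 6).insert 4 4)

-- B's while-loop, as fuel recursion on the loop state (n, result); fuel := n.natAbs + 1 suffices.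
def pvGB : Nat → Int → Int → Int
  | 0, _, result => result  -- unreachable with sufficient fuel
  | fuel+1, n, result =>
    if n ≥ 5 then
      let m := PySem.Int.floordiv n 5
      let digit : Int := if PySem.Int.mod m 2 = 0 then 6 else 4
      let digit := (PySem.List.pyRange (m * 5 + 1) (n + 1) 1).foldl
        (fun d i => PySem.Int.mod (d * PySem.Int.mod i 10) 10) digit
      let remainder : List Int := [2, 4, 8, 6]
      let digit := (PySem.List.pyGet? remainder
        (PySem.Int.mod ((((PySem.List.index? remainder digit).getD 0 : Nat) : Int) - PySem.Int.mod m 4) 4)).getD 0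
      pvGB fuel m (PySem.Int.mod (result * digit) 10)
    else
      -- base[n]: KeyError for n < 0, excluded by Pre_
      PySem.Int.mod (result * (pvBase.getD n 0)) 10

def getRightMostDigit_alt (n : Int) : Int := pvGB (n.natAbs + 1) n 1

-- ===== PRECONDITION & SPEC =====
-- Pre_ excludes negative n, where factorial is undefined: A still returns a value there (an
-- artefact of running the same digit machinery on a nonsense input), while B's base-table
-- lookup raises KeyError.
def Pre_getRightMostDigit (n : Int) : Prop := 0 ≤ n
instance (n : Int) : Decidable (Pre_getRightMostDigit n) := by unfold Pre_getRightMostDigit; infer_instance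
def pvWitness_getRightMostDigit : Int := 25

def Spec_getRightMostDigit (n : Int) (out : Int) : Prop := out = getRightMostDigit_alt n
instance (n : Int) (out : Int) : Decidable (Spec_getRightMostDigit n out) := by unfold Spec_getRightMostDigit; infer_instance

-- ===== CLAIM (what is proved, stated in full; the proofs are below) =====
def Claim_equal_getRightMostDigit : Prop := ∀ (n : Int), Dom_getRightMostDigit n → Pre_getRightMostDigit n → Spec_getRightMostDigit n (getRightMostDigit n)

-- ===== LEMMAS AND PROOFS =====

theorem pv_mod10_eq_emod (a : Int) : PySem.Int.mod a 10 = a % 10 :=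
  PySem.Int.mod_eq_emod_of_pos (by norm_num)

theorem pv_mod4_eq_emod (a : Int) : PySem.Int.mod a 4 = a % 4 :=
  PySem.Int.mod_eq_emod_of_pos (by norm_num)

theorem pv_wrap_eq (idx mm : Int) (h1 : 0 ≤ idx) (h2 : idx < 4) (h3 : 0 ≤ mm) (h4 : mm < 4) :
    PySem.List.pyGet? ([2,4,8,6] : List Int) (idx - mm)
      = PySem.List.pyGet? ([2,4,8,6] : List Int) ((idx - mm) % 4) := by
  interval_cases idx <;> interval_cases mm <;> decide

theorem pv_idx_bound (d : Int) :
    ((PySem.List.index? ([2,4,8,6] : List Int) d).getD 0) < 4 := by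
  cases h : PySem.List.index? ([2,4,8,6] : List Int) d with
  | none => simp
  | some k =>
    obtain ⟨hk, -, -⟩ := PySem.List.getElem_of_index?_eq_some h
    simpa using hk

-- the per-level index step of A (negative-index wraparound) equals B's explicit % 4
theorem pv_step_eq (m d : Int) :
    (PySem.List.pyGet? ([2,4,8,6] : List Int)
      ((((PySem.List.index? ([2,4,8,6] : List Int) d).getD 0 : Nat) : Int)
        - PySem.Int.mod (PySem.Int.mod m 4) 4)).getD 0
    = (PySem.List.pyGet? ([2,4,8,6] : List Int)
      (PySem.Int.mod ((((PySem.List.index? ([2,4,8,6] : List Int) d).getD 0 : Nat) : Int)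
        - PySem.Int.mod m 4) 4)).getD 0 := by
  have hmm : PySem.Int.mod (PySem.Int.mod m 4) 4 = PySem.Int.mod m 4 := by
    rw [pv_mod4_eq_emod, pv_mod4_eq_emod, Int.emod_emod_of_dvd _ dvd_rfl]
  rw [hmm, pv_mod4_eq_emod ((((PySem.List.index? ([2,4,8,6] : List Int) d).getD 0 : Nat) : Int) - PySem.Int.mod m 4),
      pv_wrap_eq]
  · exact Int.natCast_nonneg _
  · exact_mod_cast pv_idx_bound d
  · rw [pv_mod4_eq_emod]; exact Int.emod_nonneg m (by norm_num)
  · rw [pv_mod4_eq_emod]; exact Int.emod_lt_of_pos m (by norm_num)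

-- A's value is always in [0, 10), so it is a fixed point of % 10
theorem pv_gA_bounds (fuel : Nat) (n : Int) : 0 ≤ pvGA fuel n ∧ pvGA fuel n < 10 := by
  cases fuel with
  | zero => simp [pvGA]
  | succ f =>
    simp only [pvGA]
    split_ifs
    case _ => norm_num
    case _ => norm_num
    case _ => norm_num
    case _ => norm_num
    case _ => norm_num
    all_goals {
      rw [PySem.Int.mod_eq_emod_of_pos (by norm_num)]
      exact ⟨Int.emod_nonneg _ (by norm_num), Int.emod_lt_of_pos _ (by norm_num)⟩ }

-- invariant of B's loop: pvGB fuel n r = (r * pvGA fuel n) % 10, for 0 ≤ n and enough fuel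
theorem pv_gB_eq (fuel : Nat) : ∀ (n r : Int), 0 ≤ n → n.natAbs < fuel →
    pvGB fuel n r = PySem.Int.mod (r * pvGA fuel n) 10 := by
  induction fuel with
  | zero => intro n r _ h; omega
  | succ f ih =>
    intro n r hn hfuel
    by_cases h5 : n ≥ 5
    · -- loop body vs recursive case
      have htdiv : n.tdiv 5 = n / 5 := Int.tdiv_eq_ediv_of_nonneg hn
      have hfd : PySem.Int.floordiv n 5 = n / 5 :=
        PySem.Int.floordiv_eq_ediv_of_pos (by norm_num)
      have hm0 : 0 ≤ n / 5 := by positivity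
      have hmlt : (n / 5).natAbs < f := by omega
      simp only [pvGB, pvGA, if_pos h5,
        if_neg (by omega : ¬ n = 0), if_neg (by omega : ¬ n = 1), if_neg (by omega : ¬ n = 2),
        if_neg (by omega : ¬ n = 3), if_neg (by omega : ¬ n = 4), htdiv, hfd]
      rw [pv_step_eq, ih (n / 5) _ hm0 hmlt]
      -- ((r * d) % 10 * g) % 10 = (r * ((d * g) % 10)) % 10
      set d := (PySem.List.pyGet? ([2,4,8,6] : List Int)
        (PySem.Int.mod ((((PySem.List.index? ([2,4,8,6] : List Int)
          ((PySem.List.pyRange (n / 5 * 5 + 1) (n + 1) 1).foldl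
            (fun d i => PySem.Int.mod (d * PySem.Int.mod i 10) 10)
            (if PySem.Int.mod (n / 5) 2 = 0 then (6 : Int) else 4))).getD 0 : Nat) : Int)
          - PySem.Int.mod (n / 5) 4) 4)).getD 0 with hd
      simp only [pv_mod10_eq_emod]
      conv_lhs => rw [Int.mul_emod, Int.emod_emod_of_dvd _ dvd_rfl, ← Int.mul_emod, mul_assoc]
      conv_rhs => rw [Int.mul_emod, Int.emod_emod_of_dvd _ dvd_rfl, ← Int.mul_emod]
    · -- loop exit: n ∈ {0,1,2,3,4}
      have h4 : n ≤ 4 := by omega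
      interval_cases n <;>
        simp only [pvGB, pvGA,
          show pvBase.getD 0 0 = (1:Int) from by decide,
          show pvBase.getD 1 0 = (1:Int) from by decide,
          show pvBase.getD 2 0 = (2:Int) from by decide,
          show pvBase.getD 3 0 = (6:Int) from by decide,
          show pvBase.getD 4 0 = (4:Int) from by decide] <;> norm_num

theorem pv_gA_mod_self (fuel : Nat) (n : Int) :
    PySem.Int.mod (pvGA fuel n) 10 = pvGA fuel n := by
  obtain ⟨h0, h1⟩ := pv_gA_bounds fuel n
  rw [pv_mod10_eq_emod]
  exact Int.emod_eq_of_lt h0 h1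

-- ===== VERDICT (by name: the statement is the Claim_ definition above) =====
theorem getRightMostDigit_spec : Claim_equal_getRightMostDigit := by
  intro n _ hpre
  unfold Spec_getRightMostDigit getRightMostDigit getRightMostDigit_alt
  rw [pv_gB_eq (n.natAbs + 1) n 1 hpre (by omega), one_mul, pv_gA_mod_self]
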